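-- pv_equiv track=rewrite | github.com/TimS120/useful_scripts | scripts/static_tests.py | check_indentation_consistency
-- ===== SOURCE A (Python) =====
-- def check_indentation_consistency(lines):
--     """
--     Checks for consistent use of indentation (spaces or tabs) in the given lines.
--     """
--     initial_type = None
--     violations = []
--     for idx, line in enumerate(lines):
--         if line.strip() == "":
--             continue
--         indent = line[:len(line) - len(line.lstrip(" \t"))]
--         if not indent:
--             continue
--         has_space = " " in indent
--         has_tab = "\t" in indent
--         if has_space and has_tab:
--             violations.append((idx + 1, "mixed indentation (spaces and tabs)"))
--             continue
--         current_type = "spaces" if has_space else "tabs"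
--         if initial_type is None:
--             initial_type = current_type
--         elif current_type != initial_type:
--             violations.append(
--                 (idx + 1,
--                  f"inconsistent indentation (expected {initial_type}, got {current_type})")
--             )
--     return violations
-- ===== SOURCE B (Python) =====
-- def check_indentation_consistency(lines):
--     """
--     Checks for consistent use of indentation (spaces or tabs) in the given lines.
--     Two-phase: classify every line once, pick the reference style, then emit
--     violations from the classification list.
--     """
--     def classify(line):
--         if line.strip() == "":
--             return None
--         i = 0
--         while i < len(line) and line[i] in " \t":
--             i += 1
--         if i == 0:
--             return None
--         indent = line[:i]
--         if " " in indent and "\t" in indent: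
--             return "mixed"
--         return "spaces" if " " in indent else "tabs"
--
--     kinds = [classify(line) for line in lines]
--     ref = next((k for k in kinds if k in ("spaces", "tabs")), None)
--     out = []
--     for i, k in enumerate(kinds):
--         if k == "mixed":
--             out.append((i + 1, "mixed indentation (spaces and tabs)"))
--         elif k is not None and ref is not None and k != ref:
--             out.append(
--                 (i + 1,
--                  f"inconsistent indentation (expected {ref}, got {k})")
--             )
--     return out
-- ===== Notes on version B (the rewrite author's own statement) =====
-- stated objective: alternative
-- what changed: Replaces A's single stateful pass (threading a mutable initial_type through the loop) with a classify-once pipeline: each line is classified into None/mixed/spaces/tabs, the reference style is picked as the first spaces/tabs classification, and violations are emitted from the classification list against that fixed reference.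
import Mathlib
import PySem

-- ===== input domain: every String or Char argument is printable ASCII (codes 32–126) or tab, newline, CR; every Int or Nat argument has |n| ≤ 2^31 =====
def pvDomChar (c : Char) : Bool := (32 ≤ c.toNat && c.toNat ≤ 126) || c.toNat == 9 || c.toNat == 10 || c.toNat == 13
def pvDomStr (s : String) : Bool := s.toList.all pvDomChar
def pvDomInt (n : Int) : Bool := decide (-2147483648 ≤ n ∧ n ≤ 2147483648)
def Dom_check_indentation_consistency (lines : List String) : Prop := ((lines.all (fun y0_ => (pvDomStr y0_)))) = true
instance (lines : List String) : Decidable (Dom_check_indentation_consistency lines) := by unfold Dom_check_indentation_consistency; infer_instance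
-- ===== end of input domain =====

-- B replaces A's single stateful pass with a classify-once / pick-reference / emit pipeline (objective: alternative decomposition).

-- ===== PORT A =====
-- loop body of A's for-loop over enumerate(lines); state = (initial_type, violations)
def ciStepA (st : Option String × List (Int × String)) (p : Int × String) :
    Option String × List (Int × String) :=
  let idx := p.1
  let line := p.2
  if PySem.Str.strip line == "" then st
  else
    -- line[:len(line) - len(line.lstrip(" \t"))] is exactly the maximal prefix of ' '/'\t'
    let indent := line.toList.takeWhile (fun c => c == ' ' || c == '\t')
    if indent.isEmpty then st
    else
      let has_space := indent.contains ' '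
      let has_tab := indent.contains '\t'
      if has_space && has_tab then
        (st.1, st.2 ++ [(idx + 1, "mixed indentation (spaces and tabs)")])
      else
        let current_type := if has_space then "spaces" else "tabs"
        match st.1 with
        | none => (some current_type, st.2)
        | some it =>
          if current_type != it then
            (st.1, st.2 ++ [(idx + 1, "inconsistent indentation (expected " ++ it ++ ", got " ++ current_type ++ ")")])
          else st

def check_indentation_consistency (lines : List String) : List (Int × String) :=
  ((PySem.List.enumerate lines 0).foldl ciStepA (none, [])).2

-- ===== PORT B =====
-- classify(line) from Source B: none = skipped line, some "mixed"/"spaces"/"tabs" otherwise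
def ciClassify (line : String) : Option String :=
  if PySem.Str.strip line == "" then none
  else
    let indent := line.toList.takeWhile (fun c => c == ' ' || c == '\t')
    if indent.isEmpty then none
    else if indent.contains ' ' && indent.contains '\t' then some "mixed"
    else if indent.contains ' ' then some "spaces"
    else some "tabs"

-- loop body of Source B's emission loop over enumerate(kinds)
def ciEmit (ref : Option String) (out : List (Int × String)) (p : Int × Option String) :
    List (Int × String) :=
  match p.2 with
  | none => out
  | some k =>
    if k == "mixed" then out ++ [(p.1 + 1, "mixed indentation (spaces and tabs)")]
    else
      match ref with
      | none => out
      | some r =>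
        if k != r then out ++ [(p.1 + 1, "inconsistent indentation (expected " ++ r ++ ", got " ++ k ++ ")")]
        else out

def check_indentation_consistency_alt (lines : List String) : List (Int × String) :=
  let kinds := lines.map ciClassify
  let ref := (kinds.find? (fun k => k == some "spaces" || k == some "tabs")).join
  (PySem.List.enumerate kinds 0).foldl (ciEmit ref) []

-- ===== PRECONDITION & SPEC =====
def Spec_check_indentation_consistency (lines : List String) (out : List (Int × String)) : Prop := out = check_indentation_consistency_alt lines
instance (lines : List String) (out : List (Int × String)) : Decidable (Spec_check_indentation_consistency lines out) := by unfold Spec_check_indentation_consistency; infer_instance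

-- ===== CLAIM (what is proved, stated in full; the proofs are below) =====
def Claim_equal_check_indentation_consistency : Prop := ∀ (lines : List String), Dom_check_indentation_consistency lines → Spec_check_indentation_consistency lines (check_indentation_consistency lines)

-- ===== LEMMAS AND PROOFS =====

lemma ciClassify_cases (line : String) :
    ciClassify line = none ∨ ciClassify line = some "mixed" ∨
    ciClassify line = some "spaces" ∨ ciClassify line = some "tabs" := by
  simp only [ciClassify]
  split_ifs <;> simp

-- A's step, expressed through the classification of the line
lemma ciStepA_eq_abs (st : Option String × List (Int × String)) (p : Int × String) :
    ciStepA st p =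
      match ciClassify p.2 with
      | none => st
      | some t =>
        if t == "mixed" then (st.1, st.2 ++ [(p.1 + 1, "mixed indentation (spaces and tabs)")])
        else
          match st.1 with
          | none => (some t, st.2)
          | some it =>
            if t != it then
              (st.1, st.2 ++ [(p.1 + 1, "inconsistent indentation (expected " ++ it ++ ", got " ++ t ++ ")")])
            else st := by
  rcases p with ⟨i, line⟩
  simp only [ciStepA, ciClassify]
  split_ifs <;> rfl

lemma ciEmit_acc_step (ref : Option String) (out : List (Int × String)) (p : Int × Option String) :
    ciEmit ref out p = out ++ ciEmit ref [] p := by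
  unfold ciEmit
  rcases p with ⟨i, k⟩
  cases k with
  | none => simp
  | some t =>
    cases ref <;> simp <;> split_ifs <;> simp

lemma foldl_ciEmit_acc (ref : Option String) (l : List (Int × Option String)) :
    ∀ out, l.foldl (ciEmit ref) out = out ++ l.foldl (ciEmit ref) [] := by
  induction l with
  | nil => simp
  | cons p l ih =>
    intro out
    simp only [List.foldl_cons]
    rw [ih (ciEmit ref out p), ih (ciEmit ref [] p), ciEmit_acc_step ref out p,
      List.append_assoc]

-- once the reference style is established, A's loop emits exactly what B's loop emits
lemma phase2 (ls : List String) :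
    ∀ (i : Int) (r : String) (acc : List (Int × String)),
      (PySem.List.enumerate ls i).foldl ciStepA (some r, acc) =
        (some r, acc ++ (PySem.List.enumerate (ls.map ciClassify) i).foldl (ciEmit (some r)) []) := by
  induction ls with
  | nil => intro i r acc; simp [PySem.List.enumerate_nil]
  | cons l ls ih =>
    intro i r acc
    simp only [List.map_cons, PySem.List.enumerate_cons, List.foldl_cons]
    rw [ciStepA_eq_abs]
    rcases ciClassify_cases l with h | h | h | h <;> rw [h] <;>
        simp only [ciEmit, String.reduceBEq, Bool.false_eq_true, if_false, if_true, List.nil_append]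
    · rw [ih]
    · rw [foldl_ciEmit_acc, ih]; simp
    · by_cases hr : (("spaces" : String) != r) = true
      · rw [if_pos hr, if_pos hr, foldl_ciEmit_acc, ih]; simp
      · rw [if_neg hr, if_neg hr, ih]
    · by_cases hr : (("tabs" : String) != r) = true
      · rw [if_pos hr, if_pos hr, foldl_ciEmit_acc, ih]; simp
      · rw [if_neg hr, if_neg hr, ih]

-- while A is still searching for the reference style, B's global reference is the
-- first spaces/tabs classification of the remaining lines
lemma phase1 (ls : List String) :
    ∀ (i : Int) (acc : List (Int × String)),
      ((PySem.List.enumerate ls i).foldl ciStepA (none, acc)).2 =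
        acc ++ (PySem.List.enumerate (ls.map ciClassify) i).foldl
          (ciEmit ((ls.map ciClassify).find? (fun k => k == some "spaces" || k == some "tabs")).join) [] := by
  induction ls with
  | nil => intro i acc; simp [PySem.List.enumerate_nil]
  | cons l ls ih =>
    intro i acc
    simp only [List.map_cons, PySem.List.enumerate_cons, List.foldl_cons]
    rw [ciStepA_eq_abs]
    rcases ciClassify_cases l with h | h | h | h <;> rw [h] <;> simp only [List.find?]
    · rw [show ((none : Option String) == some "spaces" || (none : Option String) == some "tabs") = false from rfl]
      simp only [ciEmit]
      rw [ih]
    · rw [show ((some "mixed" : Option String) == some "spaces" || (some "mixed" : Option String) == some "tabs") = false from rfl]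
      simp only [ciEmit, String.reduceBEq, if_true, List.nil_append]
      rw [foldl_ciEmit_acc, ih]
      simp
    · rw [show ((some "spaces" : Option String) == some "spaces" || (some "spaces" : Option String) == some "tabs") = true from rfl]
      simp only [ciEmit, String.reduceBEq, Bool.false_eq_true, if_false, Option.join_some,
        bne_self_eq_false, List.nil_append]
      rw [phase2 ls]
    · rw [show ((some "tabs" : Option String) == some "spaces" || (some "tabs" : Option String) == some "tabs") = true from rfl]
      simp only [ciEmit, String.reduceBEq, Bool.false_eq_true, if_false, Option.join_some,
        bne_self_eq_false, List.nil_append]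
      rw [phase2 ls]

-- ===== VERDICT (by name: the statement is the Claim_ definition above) =====
theorem check_indentation_consistency_spec : Claim_equal_check_indentation_consistency := by
  intro lines _
  unfold Spec_check_indentation_consistency check_indentation_consistency check_indentation_consistency_alt
  rw [phase1 lines 0 []]
  simp
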